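-- pv_equiv track=rewrite | github.com/in-rolls/parse_unsearchable_rolls | scripts/delhi/delhi_mpi.py | extract_p_name_add
-- ===== SOURCE A (Python) =====
-- def extract_p_name_add(text):
--
-- 	keywords = ['Name','Address']
-- 	found_keywords = ["",""]
--
-- 	for idx,key in enumerate(keywords):
--
-- 		for t_idx, t in enumerate(text):
-- 			if key in t:
--
-- 				if len(text)>t_idx+1:
-- 					found_keywords[idx]  = text[t_idx+1]
--
-- 	return found_keywords
-- ===== SOURCE B (Python) =====
-- def extract_p_name_add(text):
--     pairs = list(zip(text, text[1:]))
--
--     def find_last(key):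
--         for prev, nxt in reversed(pairs):
--             if key in prev:
--                 return nxt
--         return ""
--
--     return [find_last('Name'), find_last('Address')]
-- ===== Notes on version B (the rewrite author's own statement) =====
-- stated objective: alternative
-- what changed: Replaces A's forward double loop that overwrites the slot on every keyword match having a successor with a single reverse early-exit scan over the list of adjacent pairs, returning the successor of the last matching element directly.
import Mathlib
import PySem

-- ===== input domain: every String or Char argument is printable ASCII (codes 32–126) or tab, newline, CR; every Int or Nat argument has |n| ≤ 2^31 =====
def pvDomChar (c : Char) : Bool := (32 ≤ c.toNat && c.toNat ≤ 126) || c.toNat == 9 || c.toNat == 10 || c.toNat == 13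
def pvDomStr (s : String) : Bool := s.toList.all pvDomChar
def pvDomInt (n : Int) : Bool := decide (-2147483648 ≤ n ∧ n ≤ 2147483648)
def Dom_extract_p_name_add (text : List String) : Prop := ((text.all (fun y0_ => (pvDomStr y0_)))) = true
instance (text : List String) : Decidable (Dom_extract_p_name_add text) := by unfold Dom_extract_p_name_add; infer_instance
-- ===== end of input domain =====

-- B replaces A's forward double loop with overwrite by a reverse early-exit scan over adjacent pairs (alternative decomposition, same result).


-- ===== PORT A =====
def extract_p_name_add (text : List String) : List String :=
  let keywords : List String := ["Name", "Address"]
  let found_keywords : List String := ["", ""]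
  (PySem.List.enumerate keywords).foldl (fun found p =>
    (PySem.List.enumerate text).foldl (fun found q =>
      if PySem.Str.isIn p.2 q.2 then
        if (text.length : Int) > q.1 + 1 then
          found.set p.1.toNat ((PySem.List.pyGet? text (q.1 + 1)).getD "")
        else found
      else found) found) found_keywords

-- ===== PORT B =====
def pvFindLast (key : String) : List (String × String) → String
  | [] => ""
  | (prev, nxt) :: rest => if PySem.Str.isIn key prev then nxt else pvFindLast key rest

def extract_p_name_add_alt (text : List String) : List String :=
  let pairs := text.zip (PySem.List.slice text (some 1) none)
  [pvFindLast "Name" pairs.reverse, pvFindLast "Address" pairs.reverse]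

-- ===== PRECONDITION & SPEC =====
def Spec_extract_p_name_add (text : List String) (out : List String) : Prop := out = extract_p_name_add_alt text
instance (text : List String) (out : List String) : Decidable (Spec_extract_p_name_add text out) := by unfold Spec_extract_p_name_add; infer_instance

-- ===== CLAIM (what is proved, stated in full; the proofs are below) =====
def Claim_equal_extract_p_name_add : Prop := ∀ (text : List String), Dom_extract_p_name_add text → Spec_extract_p_name_add text (extract_p_name_add text)

-- ===== LEMMAS AND PROOFS =====

-- pvFindLast with an explicit default accumulator (proof-only helper)
def pvFLD (key : String) : List (String × String) → String → String
  | [], acc => acc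
  | (p, n) :: rest, acc => if PySem.Str.isIn key p then n else pvFLD key rest acc

theorem pvFindLast_eq_pvFLD (key : String) (l : List (String × String)) :
    pvFindLast key l = pvFLD key l "" := by
  induction l with
  | nil => rfl
  | cons pn rest ih =>
    obtain ⟨p, n⟩ := pn
    rw [pvFindLast, pvFLD, ih]

theorem pvFLD_append (key : String) (l : List (String × String)) (p n : String) (acc : String) :
    pvFLD key (l ++ [(p, n)]) acc = pvFLD key l (if PySem.Str.isIn key p then n else acc) := by
  induction l generalizing acc with
  | nil => rfl
  | cons pn rest ih =>
    obtain ⟨q, m⟩ := pn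
    simp only [List.cons_append, pvFLD, ih]

-- the last-match-wins string fold equals B's reverse first-match scan
theorem sfold_eq_pvFLD (key : String) (l : List (String × String)) :
    ∀ acc, l.foldl (fun a pn => if PySem.Str.isIn key pn.1 then pn.2 else a) acc
      = pvFLD key l.reverse acc := by
  induction l with
  | nil => intro acc; rfl
  | cons pn rest ih =>
    intro acc
    obtain ⟨p, n⟩ := pn
    simp only [List.foldl_cons, List.reverse_cons, pvFLD_append, ih]

theorem sfold_congr (key : String) (l : List (String × String))
    (h : l.any (fun pn => PySem.Str.isIn key pn.1) = true) (x y : String) :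
    l.foldl (fun a pn => if PySem.Str.isIn key pn.1 then pn.2 else a) x
      = l.foldl (fun a pn => if PySem.Str.isIn key pn.1 then pn.2 else a) y := by
  induction l generalizing x y with
  | nil => simp at h
  | cons pn rest ih =>
    by_cases hc : PySem.Str.isIn key pn.1 = true
    · rw [List.foldl_cons, List.foldl_cons, if_pos hc, if_pos hc]
    · have hcf : PySem.Str.isIn key pn.1 = false := by
        revert hc; cases PySem.Str.isIn key pn.1 <;> simp
      rw [List.any_cons] at h
      simp only [hcf, Bool.false_or] at h
      rw [List.foldl_cons, List.foldl_cons, if_neg hc, if_neg hc]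
      exact ih h x y

theorem sfold_of_not_any (key : String) (l : List (String × String))
    (h : l.any (fun pn => PySem.Str.isIn key pn.1) = false) (x : String) :
    l.foldl (fun a pn => if PySem.Str.isIn key pn.1 then pn.2 else a) x = x := by
  induction l generalizing x with
  | nil => rfl
  | cons pn rest ih =>
    rw [List.any_cons, Bool.or_eq_false_iff] at h
    rw [List.foldl_cons, if_neg (by rw [h.1]; exact Bool.false_ne_true)]
    exact ih h.2 x

-- when no element matches, B's reverse scan returns the default ""
theorem pvFindLast_of_not_any (key : String) (l : List (String × String))
    (h : l.any (fun pn => PySem.Str.isIn key pn.1) = false) :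
    pvFindLast key l.reverse = "" := by
  rw [pvFindLast_eq_pvFLD, ← sfold_eq_pvFLD, sfold_of_not_any key l h]

-- the list-state fold that keeps setting slot idx equals a conditional single set
theorem lfold_set (key : String) (idx : Nat) (l : List (String × String)) :
    ∀ fd : List String,
    l.foldl (fun fd pn => if PySem.Str.isIn key pn.1 then fd.set idx pn.2 else fd) fd
      = if l.any (fun pn => PySem.Str.isIn key pn.1) then
          fd.set idx (l.foldl (fun a pn => if PySem.Str.isIn key pn.1 then pn.2 else a) "")
        else fd := by
  induction l with
  | nil => intro fd; rfl
  | cons pn rest ih =>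
    intro fd
    rw [List.foldl_cons]
    by_cases hc : PySem.Str.isIn key pn.1 = true
    · have hany : ((pn :: rest).any fun pn => PySem.Str.isIn key pn.1) = true := by
        rw [List.any_cons]; simp only [hc, Bool.true_or]
      rw [if_pos hc, ih, if_pos hany, List.foldl_cons, if_pos hc]
      by_cases ha : (rest.any fun pn => PySem.Str.isIn key pn.1) = true
      · rw [if_pos ha, List.set_set, sfold_congr key rest ha "" pn.2]
      · have haf : (rest.any fun pn => PySem.Str.isIn key pn.1) = false := by
          revert ha; cases rest.any fun pn => PySem.Str.isIn key pn.1 <;> simp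
        rw [if_neg ha, sfold_of_not_any key rest haf pn.2]
    · have hcf : PySem.Str.isIn key pn.1 = false := by
        revert hc; cases PySem.Str.isIn key pn.1 <;> simp
      rw [if_neg hc, ih, List.any_cons]
      simp only [hcf, Bool.false_or, List.foldl_cons]
      rw [if_neg Bool.false_ne_true]

-- A's inner enumerate fold over a suffix equals the pair-list fold
theorem enumFold_eq_zipFold (key : String) (idx : Nat) (text : List String) :
    ∀ (rest : List String) (s : Nat), rest = text.drop s →
    ∀ fd : List String,
    (PySem.List.enumerate rest (s : Int)).foldl
      (fun fd q => if PySem.Str.isIn key q.2 then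
          (if (text.length : Int) > q.1 + 1 then
            fd.set idx ((PySem.List.pyGet? text (q.1 + 1)).getD "")
          else fd)
        else fd) fd
      = (rest.zip (text.drop (s + 1))).foldl
          (fun fd pn => if PySem.Str.isIn key pn.1 then fd.set idx pn.2 else fd) fd := by
  intro rest
  induction rest with
  | nil => intro s hs fd; simp [PySem.List.enumerate_nil]
  | cons t rest' ih =>
    intro s hs fd
    have hdrop : text.drop (s + 1) = rest' := by
      have h1 : (text.drop s).drop 1 = rest' := by rw [← hs]; rfl
      rw [← h1, List.drop_drop]
    have hlen : text.length = s + 1 + rest'.length := by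
      have h1 : (text.drop s).length = text.length - s := List.length_drop ..
      rw [← hs] at h1
      have h2 : s ≤ text.length := by
        by_contra hcon
        have h3 : text.drop s = [] := List.drop_eq_nil_of_le (by omega)
        rw [← hs] at h3; simp at h3
      simp at h1; omega
    rw [PySem.List.enumerate_cons, List.foldl_cons, hdrop]
    cases rest' with
    | nil =>
      have hL : ¬ ((text.length : Int) > (s : Int) + 1) := by
        simp at hlen; push_cast [hlen]; omega
      rw [if_neg hL, ite_self]
      rw [show ((s : Int) + 1) = ((s + 1 : Nat) : Int) by push_cast; ring]
      rw [ih (s + 1) (by rw [hdrop])]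
      simp [List.zip_nil_right]
    | cons r0 r'' =>
      have hL : (text.length : Int) > (s : Int) + 1 := by
        simp only [List.length_cons] at hlen; push_cast [hlen]; omega
      have hdrop2 : text.drop (s + 1 + 1) = r'' := by
        have h1 : (text.drop (s + 1)).drop 1 = r'' := by rw [hdrop]; rfl
        rw [← h1, List.drop_drop]
      have hget : PySem.List.pyGet? text ((s : Int) + 1) = some r0 := by
        rw [show ((s : Int) + 1) = ((s + 1 : Nat) : Int) by push_cast; ring,
          PySem.List.pyGet?_natCast]
        have h1 : text[s + 1]? = (text.drop (s + 1))[0]? := by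
          rw [List.getElem?_drop]
        rw [h1, hdrop]; rfl
      rw [List.zip_cons_cons, List.foldl_cons]
      have hstep : ∀ fd' : List String,
          (if PySem.Str.isIn key t then fd'.set idx r0 else fd') =
          (if PySem.Str.isIn key t then
            (if (text.length : Int) > (s : Int) + 1 then
              fd'.set idx ((PySem.List.pyGet? text ((s : Int) + 1)).getD "")
            else fd')
          else fd') := by
        intro fd'; rw [if_pos hL, hget]; rfl
      rw [← hstep fd]
      rw [show ((s : Int) + 1) = ((s + 1 : Nat) : Int) by push_cast; ring]
      rw [ih (s + 1) (by rw [hdrop]), hdrop2]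

-- one keyword's whole inner loop, from state fd, in terms of B's scan
theorem inner_loop_eq (key : String) (idx : Nat) (text : List String) (fd : List String) :
    (PySem.List.enumerate text).foldl
      (fun fd q => if PySem.Str.isIn key q.2 then
          (if (text.length : Int) > q.1 + 1 then
            fd.set idx ((PySem.List.pyGet? text (q.1 + 1)).getD "")
          else fd)
        else fd) fd
      = if (text.zip (text.drop 1)).any (fun pn => PySem.Str.isIn key pn.1) then
          fd.set idx (pvFindLast key (text.zip (text.drop 1)).reverse)
        else fd := by
  have h0 : PySem.List.enumerate text = PySem.List.enumerate text ((0 : Nat) : Int) := by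
    norm_num
  rw [h0, enumFold_eq_zipFold key idx text text 0 (by simp) fd]
  simp only [Nat.zero_add]
  rw [lfold_set, pvFindLast_eq_pvFLD, ← sfold_eq_pvFLD]

-- ===== VERDICT (by name: the statement is the Claim_ definition above) =====
theorem extract_p_name_add_spec : Claim_equal_extract_p_name_add := by
  intro text _
  unfold Spec_extract_p_name_add extract_p_name_add extract_p_name_add_alt
  simp only [PySem.List.enumerate_cons, PySem.List.enumerate_nil, List.foldl_cons,
    List.foldl_nil, PySem.List.slice_from_one, Int.toNat_zero, Int.toNat_one, zero_add]
  rw [show text.tail = text.drop 1 from List.drop_one.symm]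
  rw [inner_loop_eq "Name" 0, inner_loop_eq "Address" 1]
  by_cases hN : ((text.zip (text.drop 1)).any fun pn => PySem.Str.isIn "Name" pn.1) = true <;>
  by_cases hA : ((text.zip (text.drop 1)).any fun pn => PySem.Str.isIn "Address" pn.1) = true
  · rw [if_pos hN, if_pos hA]; rfl
  · have hAf : ((text.zip (text.drop 1)).any fun pn => PySem.Str.isIn "Address" pn.1) = false := by
      revert hA; cases (text.zip (text.drop 1)).any fun pn => PySem.Str.isIn "Address" pn.1 <;> simp
    rw [if_pos hN, if_neg hA, pvFindLast_of_not_any "Address" _ hAf]; rfl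
  · have hNf : ((text.zip (text.drop 1)).any fun pn => PySem.Str.isIn "Name" pn.1) = false := by
      revert hN; cases (text.zip (text.drop 1)).any fun pn => PySem.Str.isIn "Name" pn.1 <;> simp
    rw [if_neg hN, if_pos hA, pvFindLast_of_not_any "Name" _ hNf]; rfl
  · have hNf : ((text.zip (text.drop 1)).any fun pn => PySem.Str.isIn "Name" pn.1) = false := by
      revert hN; cases (text.zip (text.drop 1)).any fun pn => PySem.Str.isIn "Name" pn.1 <;> simp
    have hAf : ((text.zip (text.drop 1)).any fun pn => PySem.Str.isIn "Address" pn.1) = false := by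
      revert hA; cases (text.zip (text.drop 1)).any fun pn => PySem.Str.isIn "Address" pn.1 <;> simp
    rw [if_neg hN, if_neg hA, pvFindLast_of_not_any "Name" _ hNf,
      pvFindLast_of_not_any "Address" _ hAf]
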